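-- pv_equiv track=rewrite | github.com/lim123456789/programmers | 프로그래머스/2/12981. 영어 끝말잇기/영어 끝말잇기.py | solution
-- ===== SOURCE A (Python) =====
-- def solution(n, words):
--     wordlist = set()
--     wordlist.add(words[0])
--
--     for i in range(1, len(words)):
--         if (words[i] in wordlist) or (words[i-1][-1] is not words[i][0]):
--             return [(i % n) + 1, (i // n) + 1]
--         wordlist.add(words[i])
--
--     return [0, 0]
-- ===== SOURCE B (Python) =====
-- def solution(n, words):
--     # pass 1: earliest repeated-word index (or None)
--     seen = {words[0]}
--     repeat = None
--     for i in range(1, len(words)):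
--         if words[i] in seen:
--             repeat = i
--             break
--         seen.add(words[i])
--     # pass 2: earliest chain-break, scanning only indices the game reaches
--     limit = len(words) if repeat is None else repeat
--     off = repeat
--     for i in range(1, limit):
--         if words[i - 1][-1] is not words[i][0]:
--             off = i
--             break
--     if off is None:
--         return [0, 0]
--     return [(off % n) + 1, (off // n) + 1]
-- ===== Notes on version B (the rewrite author's own statement) =====
-- stated objective: alternative
-- what changed: Instead of one scan testing (duplicate OR chain-break) with a single growing set, B runs two passes: first the earliest repeated-word index, then a chain-break scan bounded by that index, combining them arithmetically; B raises exactly where A raises, so Pre_ excludes only crashes.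
import Mathlib
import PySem

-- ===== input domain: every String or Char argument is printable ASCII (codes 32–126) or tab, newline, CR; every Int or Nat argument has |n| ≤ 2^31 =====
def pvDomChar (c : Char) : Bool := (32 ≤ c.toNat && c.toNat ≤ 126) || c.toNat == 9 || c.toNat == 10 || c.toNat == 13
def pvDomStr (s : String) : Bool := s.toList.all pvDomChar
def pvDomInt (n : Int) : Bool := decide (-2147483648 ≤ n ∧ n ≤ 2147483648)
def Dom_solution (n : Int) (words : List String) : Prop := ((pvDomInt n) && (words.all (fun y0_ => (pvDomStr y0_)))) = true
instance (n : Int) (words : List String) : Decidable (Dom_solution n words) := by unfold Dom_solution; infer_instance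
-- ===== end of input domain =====

-- One honest line: B replaces A's single scan (duplicate-or-break with one growing set) by two passes —
-- an earliest-repeat pass, then a chain-break pass bounded by the repeat index (objective: alternative).
-- On the ASCII domain Dom_, Python's `is not` on the 1-char strings equals `!=` (interned), ported as Option Char inequality.

-- ===== PORT A =====
-- for i in range(1, len(words)): the single scan, carrying the growing set
def solutionLoopA (n : Int) (words : List String) (wordlist : PySem.Set String) (i : Nat) : List Int :=
  if _h : i < words.length then
    if PySem.Set.contains wordlist (words.getD i "") ∨
       PySem.Str.pyGet? (words.getD (i - 1) "") (-1) ≠ PySem.Str.pyGet? (words.getD i "") 0 then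
      [PySem.Int.mod (i : Int) n + 1, PySem.Int.floordiv (i : Int) n + 1]
    else
      solutionLoopA n words (PySem.Set.add wordlist (words.getD i "")) (i + 1)
  else [0, 0]
termination_by words.length - i

def solution (n : Int) (words : List String) : List Int :=
  solutionLoopA n words (PySem.Set.add PySem.Set.empty (words.getD 0 "")) 1

-- ===== PORT B =====
-- pass 1: earliest repeated-word index, with the seen-set
def findRepeat (words : List String) (seen : PySem.Set String) (i : Nat) : Option Nat :=
  if _h : i < words.length then
    if PySem.Set.contains seen (words.getD i "") then some i
    else findRepeat words (PySem.Set.add seen (words.getD i "")) (i + 1)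
  else none
termination_by words.length - i

-- pass 2: earliest chain-break index, scanning for i in range(1, limit)
def findBreakUpto (words : List String) (limit : Nat) (i : Nat) : Option Nat :=
  if _h : i < limit then
    if PySem.Str.pyGet? (words.getD (i - 1) "") (-1) ≠ PySem.Str.pyGet? (words.getD i "") 0 then
      some i
    else findBreakUpto words limit (i + 1)
  else none
termination_by limit - i

def solution_alt (n : Int) (words : List String) : List Int :=
  let rep := findRepeat words (PySem.Set.add PySem.Set.empty (words.getD 0 "")) 1
  let limit := match rep with | none => words.length | some r => r
  let off := match findBreakUpto words limit 1 with
             | some i => some i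
             | none => rep
  match off with
  | none => [0, 0]
  | some i => [PySem.Int.mod (i : Int) n + 1, PySem.Int.floordiv (i : Int) n + 1]

-- ===== PRECONDITION & SPEC =====
-- Pre_ excludes exactly the inputs on which Python A raises (B raises at the same places): the empty
-- list (IndexError on words[0]); a scan that reaches a character access on an empty word "" with no
-- earlier offense (IndexError on ""[-1]/""[0]); and n = 0 when the scan stops at an offense
-- (ZeroDivisionError on i % n). A returns normally on every input admitted.
def Pre_solution (n : Int) (words : List String) : Prop :=
  words ≠ [] ∧
  ¬ (∃ i ∈ List.range words.length, 1 ≤ i ∧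
       (words.getD (i - 1) "" = "" ∨ words.getD i "" = "") ∧
       words.getD i "" ∉ words.take i ∧
       ∀ j ∈ List.range i, 1 ≤ j →
         (words.getD j "" ∉ words.take j ∧
          words.getD (j - 1) "" ≠ "" ∧ words.getD j "" ≠ "" ∧
          PySem.Str.pyGet? (words.getD (j - 1) "") (-1) = PySem.Str.pyGet? (words.getD j "") 0)) ∧
  (n ≠ 0 ∨ ∀ i ∈ List.range words.length, 1 ≤ i →
      (words.getD i "" ∉ words.take i ∧
       PySem.Str.pyGet? (words.getD (i - 1) "") (-1) = PySem.Str.pyGet? (words.getD i "") 0))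
instance (n : Int) (words : List String) : Decidable (Pre_solution n words) := by
  unfold Pre_solution; infer_instance

def pvWitness_solution : Int × List String := (2, ["ab", "ba", "ab"])

def Spec_solution (n : Int) (words : List String) (out : List Int) : Prop := out = solution_alt n words
instance (n : Int) (words : List String) (out : List Int) : Decidable (Spec_solution n words out) := by unfold Spec_solution; infer_instance

-- ===== CLAIM (what is proved, stated in full; the proofs are below) =====
def Claim_equal_solution : Prop := ∀ (n : Int) (words : List String), Dom_solution n words → Pre_solution n words → Spec_solution n words (solution n words)

-- ===== LEMMAS AND PROOFS =====

-- unbounded first chain-break, a proof-side abstraction shared by both ports' characterisations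
def findBreak (words : List String) (i : Nat) : Option Nat :=
  if _h : i < words.length then
    if PySem.Str.pyGet? (words.getD (i - 1) "") (-1) ≠ PySem.Str.pyGet? (words.getD i "") 0 then
      some i
    else findBreak words (i + 1)
  else none
termination_by words.length - i

-- output of the offense branch, proof bookkeeping only
def pvEmit (n : Int) (o : Option Nat) : List Int :=
  match o with
  | none => [0, 0]
  | some i => [PySem.Int.mod (i : Int) n + 1, PySem.Int.floordiv (i : Int) n + 1]

def pvMerge : Option Nat → Option Nat → Option Nat
  | none, o => o
  | some i, none => some i
  | some i, some j => some (min i j)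

lemma findBreak_ge (words : List String) (i j : Nat) (h : findBreak words i = some j) : i ≤ j := by
  fun_induction findBreak words i with
  | case1 i hlt hbr => simp_all
  | case2 i hlt hbr ih => exact Nat.le_of_succ_le (ih h)
  | case3 i hlt => simp_all

lemma findBreak_lt (words : List String) (i j : Nat) (h : findBreak words i = some j) :
    j < words.length := by
  fun_induction findBreak words i with
  | case1 i hlt hbr => simp_all
  | case2 i hlt hbr ih => exact ih h
  | case3 i hlt => simp_all

lemma findRepeat_ge (words : List String) (seen : PySem.Set String) (i j : Nat)
    (h : findRepeat words seen i = some j) : i ≤ j := by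
  fun_induction findRepeat words seen i with
  | case1 seen i hlt hdup => simp_all
  | case2 seen i hlt hdup ih => exact Nat.le_of_succ_le (ih h)
  | case3 seen i hlt => simp_all

lemma findRepeat_lt (words : List String) (seen : PySem.Set String) (i j : Nat)
    (h : findRepeat words seen i = some j) : j < words.length := by
  fun_induction findRepeat words seen i with
  | case1 seen i hlt hdup => simp_all
  | case2 seen i hlt hdup ih => exact ih h
  | case3 seen i hlt => simp_all

-- the bounded break pass is the unbounded one truncated at limit
lemma findBreakUpto_spec (words : List String) (limit i : Nat) (hlim : limit ≤ words.length) :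
    findBreakUpto words limit i =
      match findBreak words i with
      | some b => if b < limit then some b else none
      | none => none := by
  fun_induction findBreakUpto words limit i with
  | case1 i hlt hbr =>
      rw [findBreak, dif_pos (by omega), if_pos hbr]
      simp [hlt]
  | case2 i hlt hbr ih =>
      rw [findBreak, dif_pos (by omega), if_neg hbr]
      exact ih
  | case3 i hlt =>
      cases hfb : findBreak words i with
      | none => simp
      | some b =>
          have := findBreak_ge words i b hfb
          simp; omega

lemma solution_alt_eq_emit (n : Int) (words : List String) :
    solution_alt n words =
      pvEmit n (pvMerge (findBreak words 1)
        (findRepeat words (PySem.Set.add PySem.Set.empty (words.getD 0 "")) 1)) := by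
  unfold solution_alt
  cases hr : findRepeat words (PySem.Set.add PySem.Set.empty (words.getD 0 "")) 1 with
  | none =>
      dsimp only
      rw [findBreakUpto_spec words words.length 1 (le_refl _)]
      cases hb : findBreak words 1 with
      | none => simp [pvEmit, pvMerge]
      | some b =>
          have := findBreak_lt words 1 b hb
          simp [this, pvEmit, pvMerge]
  | some r =>
      have hrlt := findRepeat_lt words _ 1 r hr
      dsimp only
      rw [findBreakUpto_spec words r 1 (by omega)]
      cases hb : findBreak words 1 with
      | none => simp [pvEmit, pvMerge]
      | some b =>
          by_cases hbr : b < r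
          · simp [hbr, pvEmit, pvMerge, Nat.min_eq_left (by omega : b ≤ r)]
          · simp [hbr, pvEmit, pvMerge, Nat.min_eq_right (by omega : r ≤ b)]

lemma loopA_eq_merge (n : Int) (words : List String) (seen : PySem.Set String) (i : Nat) :
    solutionLoopA n words seen i = pvEmit n (pvMerge (findBreak words i) (findRepeat words seen i)) := by
  fun_induction solutionLoopA n words seen i with
  | case1 seen i hlt hoff =>
      rw [findBreak, findRepeat, dif_pos hlt, dif_pos hlt]
      rcases hoff with hdup | hbr
      · rw [if_pos hdup]
        by_cases hbr2 : PySem.Str.pyGet? (words.getD (i - 1) "") (-1) ≠ PySem.Str.pyGet? (words.getD i "") 0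
        · rw [if_pos hbr2]; simp [pvMerge, pvEmit]
        · rw [if_neg hbr2]
          cases hfb : findBreak words (i + 1) with
          | none => simp [pvMerge, pvEmit]
          | some j =>
              have hij := findBreak_ge words (i + 1) j hfb
              simp [pvMerge, pvEmit, Nat.min_eq_right (by omega : i ≤ j)]
      · by_cases hdup : PySem.Set.contains seen (words.getD i "") = true
        · rw [if_pos hdup, if_pos hbr]; simp [pvMerge, pvEmit]
        · rw [if_pos hbr, if_neg hdup]
          cases hfr : findRepeat words (PySem.Set.add seen (words.getD i "")) (i + 1) with
          | none => simp [pvMerge, pvEmit]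
          | some j =>
              have hij := findRepeat_ge words _ (i + 1) j hfr
              simp [pvMerge, pvEmit, Nat.min_eq_left (by omega : i ≤ j)]
  | case2 seen i hlt hoff ih =>
      rw [findBreak, findRepeat, dif_pos hlt, dif_pos hlt,
          if_neg (fun h => hoff (Or.inr h)), if_neg (fun h => hoff (Or.inl h))]
      exact ih
  | case3 seen i hlt =>
      rw [findBreak, findRepeat, dif_neg hlt, dif_neg hlt]
      simp [pvMerge, pvEmit]

theorem solution_eq_alt (n : Int) (words : List String) : solution n words = solution_alt n words := by
  rw [solution, solution_alt_eq_emit, loopA_eq_merge]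

-- ===== VERDICT (by name: the statement is the Claim_ definition above) =====
theorem solution_spec : Claim_equal_solution := by
  intro n words _ _
  unfold Spec_solution
  exact solution_eq_alt n words
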